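-- pv_equiv track=rewrite | github.com/GSYBD/SXLNLP | 吕从婕/week4/TextCut.py | simple_full_cut
-- ===== SOURCE A (Python) =====
-- def simple_full_cut(text, dict_words):
--     result = []
--     n = len(text)
--     for i in range(n):
--         for j in range(i + 1, n + 1):
--             word = text[i:j]
--             if word in dict_words:
--                 result.append(word)
--     return result
-- ===== SOURCE B (Python) =====
-- def simple_full_cut(text, dict_words):
--     # Only try substring lengths that actually occur in the dictionary,
--     # in ascending order (same output order as scanning end positions).
--     lengths = sorted({len(w) for w in dict_words if w})
--     n = len(text)
--     result = []
--     for i in range(n):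
--         for L in lengths:
--             if i + L <= n:
--                 word = text[i:i+L]
--                 if word in dict_words:
--                     result.append(word)
--     return result
-- ===== Notes on version B (the rewrite author's own statement) =====
-- stated objective: faster
-- what changed: Instead of testing every end position j for each start i (all O(n^2) substrings), B precomputes the sorted set of word lengths occurring in the dictionary and for each start only probes substrings of those lengths.
import Mathlib
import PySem

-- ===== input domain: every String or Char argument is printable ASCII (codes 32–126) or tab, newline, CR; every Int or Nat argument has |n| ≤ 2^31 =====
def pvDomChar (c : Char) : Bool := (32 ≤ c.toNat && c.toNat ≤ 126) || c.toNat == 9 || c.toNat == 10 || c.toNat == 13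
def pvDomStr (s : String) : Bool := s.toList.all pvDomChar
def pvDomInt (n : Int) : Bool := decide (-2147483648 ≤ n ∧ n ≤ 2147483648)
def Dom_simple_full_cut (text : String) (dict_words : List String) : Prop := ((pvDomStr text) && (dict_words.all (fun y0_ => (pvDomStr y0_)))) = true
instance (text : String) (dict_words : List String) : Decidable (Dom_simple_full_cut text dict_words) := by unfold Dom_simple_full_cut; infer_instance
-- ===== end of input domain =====

-- B replaces A's scan over every end position by a scan over only the (sorted, distinct)
-- word lengths present in the dictionary: fewer substring probes per start position.

-- ===== PORT A =====
def simple_full_cut (text : String) (dict_words : List String) : List String :=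
  let n : Int := PySem.Str.len text
  (PySem.List.pyRange 0 n 1).foldl (fun result i =>
    (PySem.List.pyRange (i + 1) (n + 1) 1).foldl (fun result j =>
      let word := PySem.Str.slice text (some i) (some j)
      if word ∈ dict_words then result ++ [word] else result) result) []

-- ===== PORT B =====
def simple_full_cut_alt (text : String) (dict_words : List String) : List String :=
  let lengths : List Int :=
    PySem.List.sorted
      (PySem.Set.ofList ((dict_words.filter (fun w => !w.toList.isEmpty)).map PySem.Str.len))
      (fun x => x) false
  let n : Int := PySem.Str.len text
  (PySem.List.pyRange 0 n 1).foldl (fun result i =>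
    lengths.foldl (fun result L =>
      if i + L ≤ n then
        let word := PySem.Str.slice text (some i) (some (i + L))
        if word ∈ dict_words then result ++ [word] else result
      else result) result) []

-- ===== PRECONDITION & SPEC =====
def Spec_simple_full_cut (text : String) (dict_words : List String) (out : List String) : Prop := out = simple_full_cut_alt text dict_words
instance (text : String) (dict_words : List String) (out : List String) : Decidable (Spec_simple_full_cut text dict_words out) := by unfold Spec_simple_full_cut; infer_instance

-- ===== CLAIM (what is proved, stated in full; the proofs are below) =====
def Claim_equal_simple_full_cut : Prop := ∀ (text : String) (dict_words : List String), Dom_simple_full_cut text dict_words → Spec_simple_full_cut text dict_words (simple_full_cut text dict_words)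

-- ===== LEMMAS AND PROOFS =====

-- the sorted distinct length list used by B
def pvLengths (dict_words : List String) : List Int :=
  PySem.List.sorted
    (PySem.Set.ofList ((dict_words.filter (fun w => !w.toList.isEmpty)).map PySem.Str.len))
    (fun x => x) false

lemma pvLengths_mem (dict_words : List String) (L : Int) :
    L ∈ pvLengths dict_words ↔ ∃ w ∈ dict_words, w.toList ≠ [] ∧ PySem.Str.len w = L := by
  unfold pvLengths
  rw [List.Perm.mem_iff (PySem.List.sorted_perm _ _ _), PySem.Set.mem_ofList, List.mem_map]
  constructor
  · rintro ⟨w, hw, rfl⟩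
    rw [List.mem_filter] at hw
    exact ⟨w, hw.1, by simpa using hw.2, rfl⟩
  · rintro ⟨w, hw, hne, rfl⟩
    exact ⟨w, List.mem_filter.mpr ⟨hw, by simpa using hne⟩, rfl⟩

lemma pvLengths_pairwise (dict_words : List String) :
    (pvLengths dict_words).Pairwise (· < ·) := by
  unfold pvLengths
  have hle := PySem.List.sorted_pairwise
    (PySem.Set.ofList ((dict_words.filter (fun w => !w.toList.isEmpty)).map PySem.Str.len))
    (fun x => x)
  have hnd : (PySem.List.sorted
      (PySem.Set.ofList ((dict_words.filter (fun w => !w.toList.isEmpty)).map PySem.Str.len))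
      (fun x => x) false).Nodup :=
    (PySem.List.sorted_perm _ _ _).nodup_iff.mpr (PySem.Set.nodup_ofList _)
  exact (hle.and hnd).imp (fun h => lt_of_le_of_ne h.1 h.2)

-- length of a slice text[i:j] for 0 ≤ i ≤ j ≤ n
lemma pvSliceLen (text : String) (i j : Int) (hi : 0 ≤ i) (hij : i ≤ j)
    (hj : j ≤ (text.toList.length : Int)) :
    ((PySem.Str.slice text (some i) (some j)).toList.length : Int) = j - i := by
  rw [PySem.Str.toList_slice, PySem.Chars.slice_eq_listSlice, PySem.List.length_slice]
  simp [PySem.List.clampIdx] at hj ⊢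
  rw [if_neg (by omega), if_neg (by omega)]
  omega

-- A's inner match list equals B's inner match list, for each start position i
lemma pvInner_eq (text : String) (dict_words : List String) (i : Int)
    (hi : 0 ≤ i) (_hin : i < (text.toList.length : Int)) :
    ((PySem.List.pyRange (i + 1) ((text.toList.length : Int) + 1) 1).filter
        (fun j => decide (PySem.Str.slice text (some i) (some j) ∈ dict_words))).map
      (fun j => PySem.Str.slice text (some i) (some j))
    = ((pvLengths dict_words).filter
        (fun L => decide (i + L ≤ (text.toList.length : Int) ∧
            PySem.Str.slice text (some i) (some (i + L)) ∈ dict_words))).map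
      (fun L => PySem.Str.slice text (some i) (some (i + L))) := by
  set n : Int := (text.toList.length : Int) with hn
  set SA := (PySem.List.pyRange (i + 1) (n + 1) 1).filter
      (fun j => decide (PySem.Str.slice text (some i) (some j) ∈ dict_words)) with hSA
  set SB := ((pvLengths dict_words).filter
      (fun L => decide (i + L ≤ n ∧
          PySem.Str.slice text (some i) (some (i + L)) ∈ dict_words))).map
      (fun L => i + L) with hSB
  have hSA_pw : SA.Pairwise (· < ·) :=
    (PySem.List.pairwise_lt_pyRange_one _ _).sublist List.filter_sublist
  have hSB_pw : SB.Pairwise (· < ·) :=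
    ((pvLengths_pairwise dict_words).sublist List.filter_sublist).map _
      (fun h => by omega)
  have hmem : ∀ j, j ∈ SA ↔ j ∈ SB := by
    intro j
    rw [hSA, hSB, List.mem_filter, List.mem_map, PySem.List.mem_pyRange_one]
    constructor
    · rintro ⟨⟨h1, h2⟩, h3⟩
      rw [decide_eq_true_eq] at h3
      refine ⟨j - i, List.mem_filter.mpr ⟨?_, ?_⟩, by omega⟩
      · rw [pvLengths_mem]
        refine ⟨PySem.Str.slice text (some i) (some j), h3, ?_, ?_⟩
        · have := pvSliceLen text i j hi (by omega) (by omega)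
          intro hnil; rw [hnil] at this; simp at this; omega
        · rw [PySem.Str.len_eq, pvSliceLen text i j hi (by omega) (by omega)]
      · rw [decide_eq_true_eq]
        constructor
        · omega
        · have : i + (j - i) = j := by omega
          rw [this]; exact h3
    · rintro ⟨L, hL, rfl⟩
      rw [List.mem_filter, decide_eq_true_eq] at hL
      obtain ⟨hLmem, hLe, hmem⟩ := hL
      have hL1 : 1 ≤ L := by
        rw [pvLengths_mem] at hLmem
        obtain ⟨w, _, hne, rfl⟩ := hLmem
        rw [PySem.Str.len_eq]
        have : w.toList.length ≠ 0 := fun h => hne (List.length_eq_zero_iff.mp h)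
        omega
      exact ⟨⟨by omega, by omega⟩, by rw [decide_eq_true_eq]; exact hmem⟩
  have hSA_nd : SA.Nodup := hSA_pw.imp ne_of_lt
  have hSB_nd : SB.Nodup := hSB_pw.imp ne_of_lt
  have hperm : SB.Perm SA :=
    (List.perm_ext_iff_of_nodup hSB_nd hSA_nd).mpr (fun a => (hmem a).symm)
  have heq : SA = SB := by
    have e1 := PySem.List.sorted_eq_of_perm_of_pairwise_lt SA SB (fun x => x) hperm hSB_pw
    have e2 := PySem.List.sorted_eq_of_perm_of_pairwise_lt SA SA (fun x => x) (List.Perm.refl SA) hSA_pw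
    rw [e2] at e1; exact e1
  rw [← hSA, ← hSB] at *
  rw [heq, hSB, List.map_map]
  rfl

theorem pv_main (text : String) (dict_words : List String) :
    simple_full_cut text dict_words = simple_full_cut_alt text dict_words := by
  unfold simple_full_cut simple_full_cut_alt
  simp only [PySem.Str.len_eq]
  rw [show (PySem.List.sorted
      (PySem.Set.ofList ((dict_words.filter (fun w => !w.toList.isEmpty)).map PySem.Str.len))
      (fun x => x) false) = pvLengths dict_words from rfl]
  apply PySem.List.foldl_congr_mem
  intro acc i hi
  rw [PySem.List.mem_pyRange_one] at hi
  -- rewrite B's inner body to a single-test append loop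
  have hB : (pvLengths dict_words).foldl (fun result L =>
        if i + L ≤ (text.toList.length : Int) then
          if PySem.Str.slice text (some i) (some (i + L)) ∈ dict_words then
            result ++ [PySem.Str.slice text (some i) (some (i + L))]
          else result
        else result) acc
      = (pvLengths dict_words).foldl (fun result L =>
          if (i + L ≤ (text.toList.length : Int) ∧
              PySem.Str.slice text (some i) (some (i + L)) ∈ dict_words)
          then result ++ [PySem.Str.slice text (some i) (some (i + L))] else result) acc :=
    PySem.List.foldl_congr_mem _ _ _ _ (by
      intro a L _
      split_ifs <;> first | rfl | tauto)
  rw [hB,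
      PySem.List.foldl_append_ite
        (p := fun j => PySem.Str.slice text (some i) (some j) ∈ dict_words)
        (f := fun j => PySem.Str.slice text (some i) (some j)),
      PySem.List.foldl_append_ite
        (p := fun L => i + L ≤ (text.toList.length : Int) ∧
            PySem.Str.slice text (some i) (some (i + L)) ∈ dict_words)
        (f := fun L => PySem.Str.slice text (some i) (some (i + L)))]
  congr 1
  exact pvInner_eq text dict_words i hi.1 hi.2

-- ===== VERDICT (by name: the statement is the Claim_ definition above) =====
theorem simple_full_cut_spec : Claim_equal_simple_full_cut := by
  intro text dict_words _
  exact pv_main text dict_words
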